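-- pv_equiv track=rewrite | github.com/KenMalloy/NavigationalFacultyTheory | enaqt_simulation/analyze_maze_scaling_exports.py | resolve_aliases
-- ===== SOURCE A (Python) =====
-- from typing import Iterable
--
-- ALIASES: dict[str, tuple[str, ...]] = {
--     "run_id": ("run_id",),
--     "spec_mode": ("spec_mode",),
--     "spec_id": ("spec_id",),
--     "bin_id": ("bin_id",),
--     "bin_label": ("bin_label",),
--     "maze_id": ("maze_id",),
--     "maze_seed": ("maze_seed",),
--     "maze_dim": ("maze_dim",),
--     "latent_dim": ("latent_dim",),
--     "latent_gap": ("latent_gap",),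
--     "side": ("side",),
--     "barriers": ("barriers",),
--     "gaps_per_barrier": ("gaps_per_barrier",),
--     "effective_train_evals": ("effective_train_evals",),
--     "n_runs_eval": ("n_runs_eval", "paired_n_trials", "n_pairs"),
--     "shortest_path": ("shortest_path", "shortest"),
--     "detour_ratio": ("detour_ratio",),
--     "open_fraction": ("open_fraction",),
--     "paired_norm_adv_pct_mean": (
--         "paired_norm_adv_pct_mean",
--         "norm_advantage",
--         "norm_advantage_mean",
--         "paired_normalized_advantage_pct_mean",
--         "paired.normalized_advantage_pct_mean",
--     ),
--     "paired_raw_adv_mean": (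
--         "paired_raw_adv_mean",
--         "advantage",
--         "raw_advantage_mean",
--         "paired_raw_advantage_mean",
--         "paired.raw_advantage_mean",
--     ),
--     "maze_quantum_win": ("maze_quantum_win", "quantum_wins", "quantum_win"),
--     "quantum_mean_dist": ("quantum_mean_dist", "quantum.mean_dist"),
--     "classical_mean_dist": ("classical_mean_dist", "classical.mean_dist"),
--     "planner_mean_dist": ("planner_mean_dist", "planner.mean_dist"),
--     "paired_quantum_win_rate": (
--         "paired_quantum_win_rate",
--         "trial_quantum_win_rate",
--         "trial_quantum_win_rate_mean",
--         "paired.quantum_win_rate",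
--     ),
-- }
--
-- def resolve_aliases(headers: Iterable[str]) -> dict[str, str]:
--     header_set = set(headers)
--     mapping: dict[str, str] = {}
--     for canonical, names in ALIASES.items():
--         for name in names:
--             if name in header_set:
--                 mapping[canonical] = name
--                 break
--     return mapping
-- ===== SOURCE B (Python) =====
-- from typing import Iterable
--
-- # Hand-maintained inverted index: alias name -> (canonical key, rank of the alias
-- # in the canonical key's priority order), plus the canonical key order.
-- _INDEX: dict[str, tuple[str, int]] = {
--     "run_id": ("run_id", 0),
--     "spec_mode": ("spec_mode", 0),
--     "spec_id": ("spec_id", 0),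
--     "bin_id": ("bin_id", 0),
--     "bin_label": ("bin_label", 0),
--     "maze_id": ("maze_id", 0),
--     "maze_seed": ("maze_seed", 0),
--     "maze_dim": ("maze_dim", 0),
--     "latent_dim": ("latent_dim", 0),
--     "latent_gap": ("latent_gap", 0),
--     "side": ("side", 0),
--     "barriers": ("barriers", 0),
--     "gaps_per_barrier": ("gaps_per_barrier", 0),
--     "effective_train_evals": ("effective_train_evals", 0),
--     "n_runs_eval": ("n_runs_eval", 0),
--     "paired_n_trials": ("n_runs_eval", 1),
--     "n_pairs": ("n_runs_eval", 2),
--     "shortest_path": ("shortest_path", 0),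
--     "shortest": ("shortest_path", 1),
--     "detour_ratio": ("detour_ratio", 0),
--     "open_fraction": ("open_fraction", 0),
--     "paired_norm_adv_pct_mean": ("paired_norm_adv_pct_mean", 0),
--     "norm_advantage": ("paired_norm_adv_pct_mean", 1),
--     "norm_advantage_mean": ("paired_norm_adv_pct_mean", 2),
--     "paired_normalized_advantage_pct_mean": ("paired_norm_adv_pct_mean", 3),
--     "paired.normalized_advantage_pct_mean": ("paired_norm_adv_pct_mean", 4),
--     "paired_raw_adv_mean": ("paired_raw_adv_mean", 0),
--     "advantage": ("paired_raw_adv_mean", 1),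
--     "raw_advantage_mean": ("paired_raw_adv_mean", 2),
--     "paired_raw_advantage_mean": ("paired_raw_adv_mean", 3),
--     "paired.raw_advantage_mean": ("paired_raw_adv_mean", 4),
--     "maze_quantum_win": ("maze_quantum_win", 0),
--     "quantum_wins": ("maze_quantum_win", 1),
--     "quantum_win": ("maze_quantum_win", 2),
--     "quantum_mean_dist": ("quantum_mean_dist", 0),
--     "quantum.mean_dist": ("quantum_mean_dist", 1),
--     "classical_mean_dist": ("classical_mean_dist", 0),
--     "classical.mean_dist": ("classical_mean_dist", 1),
--     "planner_mean_dist": ("planner_mean_dist", 0),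
--     "planner.mean_dist": ("planner_mean_dist", 1),
--     "paired_quantum_win_rate": ("paired_quantum_win_rate", 0),
--     "trial_quantum_win_rate": ("paired_quantum_win_rate", 1),
--     "trial_quantum_win_rate_mean": ("paired_quantum_win_rate", 2),
--     "paired.quantum_win_rate": ("paired_quantum_win_rate", 3),
-- }
--
-- _CANONICALS: list[str] = [
--     "run_id",
--     "spec_mode",
--     "spec_id",
--     "bin_id",
--     "bin_label",
--     "maze_id",
--     "maze_seed",
--     "maze_dim",
--     "latent_dim",
--     "latent_gap",
--     "side",
--     "barriers",
--     "gaps_per_barrier",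
--     "effective_train_evals",
--     "n_runs_eval",
--     "shortest_path",
--     "detour_ratio",
--     "open_fraction",
--     "paired_norm_adv_pct_mean",
--     "paired_raw_adv_mean",
--     "maze_quantum_win",
--     "quantum_mean_dist",
--     "classical_mean_dist",
--     "planner_mean_dist",
--     "paired_quantum_win_rate",
-- ]
--
--
-- def resolve_aliases(headers: Iterable[str]) -> dict[str, str]:
--     # One pass over the headers, keeping the lowest-rank alias seen per canonical.
--     best: dict[str, tuple[int, str]] = {}
--     for h in headers:
--         hit = _INDEX.get(h)
--         if hit is not None:
--             canonical, rank = hit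
--             cur = best.get(canonical)
--             if cur is None or rank < cur[0]:
--                 best[canonical] = (rank, h)
--     out: dict[str, str] = {}
--     for c in _CANONICALS:
--         if c in best:
--             out[c] = best[c][1]
--     return out
-- ===== Notes on version B (the rewrite author's own statement) =====
-- stated objective: alternative
-- what changed: B drops the canonical->aliases table entirely: it keeps a hand-written inverted index alias->(canonical, rank) plus the canonical key order, makes one pass over the headers keeping the lowest-rank alias seen per canonical, and assembles the result in canonical order; A instead scans each canonical's alias tuple against a set built from the headers.
import Mathlib
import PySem

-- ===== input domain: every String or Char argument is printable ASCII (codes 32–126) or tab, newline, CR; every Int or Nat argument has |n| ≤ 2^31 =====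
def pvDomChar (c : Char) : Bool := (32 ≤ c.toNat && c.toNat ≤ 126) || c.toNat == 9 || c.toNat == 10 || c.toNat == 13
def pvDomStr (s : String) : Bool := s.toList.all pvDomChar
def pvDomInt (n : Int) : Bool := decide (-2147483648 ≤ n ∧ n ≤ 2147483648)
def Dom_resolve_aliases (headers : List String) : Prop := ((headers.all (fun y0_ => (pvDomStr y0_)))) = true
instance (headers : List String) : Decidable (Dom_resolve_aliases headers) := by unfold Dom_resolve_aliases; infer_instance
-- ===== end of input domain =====

-- B drops the canonical->aliases table: a hand-written inverted alias -> (canonical, rank) index plus the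
-- canonical key order, one pass over the headers keeping the lowest-rank alias per canonical (objective: alternative).

-- ===== PORT A =====
def pvAliases : List (String × List String) := [
  ("run_id", ["run_id"]),
  ("spec_mode", ["spec_mode"]),
  ("spec_id", ["spec_id"]),
  ("bin_id", ["bin_id"]),
  ("bin_label", ["bin_label"]),
  ("maze_id", ["maze_id"]),
  ("maze_seed", ["maze_seed"]),
  ("maze_dim", ["maze_dim"]),
  ("latent_dim", ["latent_dim"]),
  ("latent_gap", ["latent_gap"]),
  ("side", ["side"]),
  ("barriers", ["barriers"]),
  ("gaps_per_barrier", ["gaps_per_barrier"]),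
  ("effective_train_evals", ["effective_train_evals"]),
  ("n_runs_eval", ["n_runs_eval", "paired_n_trials", "n_pairs"]),
  ("shortest_path", ["shortest_path", "shortest"]),
  ("detour_ratio", ["detour_ratio"]),
  ("open_fraction", ["open_fraction"]),
  ("paired_norm_adv_pct_mean", ["paired_norm_adv_pct_mean", "norm_advantage", "norm_advantage_mean", "paired_normalized_advantage_pct_mean", "paired.normalized_advantage_pct_mean"]),
  ("paired_raw_adv_mean", ["paired_raw_adv_mean", "advantage", "raw_advantage_mean", "paired_raw_advantage_mean", "paired.raw_advantage_mean"]),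
  ("maze_quantum_win", ["maze_quantum_win", "quantum_wins", "quantum_win"]),
  ("quantum_mean_dist", ["quantum_mean_dist", "quantum.mean_dist"]),
  ("classical_mean_dist", ["classical_mean_dist", "classical.mean_dist"]),
  ("planner_mean_dist", ["planner_mean_dist", "planner.mean_dist"]),
  ("paired_quantum_win_rate", ["paired_quantum_win_rate", "trial_quantum_win_rate", "trial_quantum_win_rate_mean", "paired.quantum_win_rate"])]

-- inner 'for name in names: if name in header_set: mapping[canonical] = name; break'
def pvInner (headerSet : PySem.Set String) (canonical : String)
    (mapping : PySem.Dict String String) : List String → PySem.Dict String String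
  | [] => mapping
  | n :: rest =>
      if PySem.Set.contains headerSet n then mapping.insert canonical n
      else pvInner headerSet canonical mapping rest

def resolve_aliases (headers : List String) : List (String × String) :=
  let headerSet : PySem.Set String := PySem.Set.ofList headers
  (pvAliases.foldl (fun mapping p => pvInner headerSet p.1 mapping p.2)
    PySem.Dict.empty).items

-- ===== PORT B =====
-- module-level literal tables of Source B: alias -> (canonical, rank), and the canonical key order
def pvIndex : PySem.Dict String (String × Int) := PySem.Dict.ofList [
  ("run_id", ("run_id", 0)),
  ("spec_mode", ("spec_mode", 0)),
  ("spec_id", ("spec_id", 0)),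
  ("bin_id", ("bin_id", 0)),
  ("bin_label", ("bin_label", 0)),
  ("maze_id", ("maze_id", 0)),
  ("maze_seed", ("maze_seed", 0)),
  ("maze_dim", ("maze_dim", 0)),
  ("latent_dim", ("latent_dim", 0)),
  ("latent_gap", ("latent_gap", 0)),
  ("side", ("side", 0)),
  ("barriers", ("barriers", 0)),
  ("gaps_per_barrier", ("gaps_per_barrier", 0)),
  ("effective_train_evals", ("effective_train_evals", 0)),
  ("n_runs_eval", ("n_runs_eval", 0)),
  ("paired_n_trials", ("n_runs_eval", 1)),
  ("n_pairs", ("n_runs_eval", 2)),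
  ("shortest_path", ("shortest_path", 0)),
  ("shortest", ("shortest_path", 1)),
  ("detour_ratio", ("detour_ratio", 0)),
  ("open_fraction", ("open_fraction", 0)),
  ("paired_norm_adv_pct_mean", ("paired_norm_adv_pct_mean", 0)),
  ("norm_advantage", ("paired_norm_adv_pct_mean", 1)),
  ("norm_advantage_mean", ("paired_norm_adv_pct_mean", 2)),
  ("paired_normalized_advantage_pct_mean", ("paired_norm_adv_pct_mean", 3)),
  ("paired.normalized_advantage_pct_mean", ("paired_norm_adv_pct_mean", 4)),
  ("paired_raw_adv_mean", ("paired_raw_adv_mean", 0)),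
  ("advantage", ("paired_raw_adv_mean", 1)),
  ("raw_advantage_mean", ("paired_raw_adv_mean", 2)),
  ("paired_raw_advantage_mean", ("paired_raw_adv_mean", 3)),
  ("paired.raw_advantage_mean", ("paired_raw_adv_mean", 4)),
  ("maze_quantum_win", ("maze_quantum_win", 0)),
  ("quantum_wins", ("maze_quantum_win", 1)),
  ("quantum_win", ("maze_quantum_win", 2)),
  ("quantum_mean_dist", ("quantum_mean_dist", 0)),
  ("quantum.mean_dist", ("quantum_mean_dist", 1)),
  ("classical_mean_dist", ("classical_mean_dist", 0)),
  ("classical.mean_dist", ("classical_mean_dist", 1)),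
  ("planner_mean_dist", ("planner_mean_dist", 0)),
  ("planner.mean_dist", ("planner_mean_dist", 1)),
  ("paired_quantum_win_rate", ("paired_quantum_win_rate", 0)),
  ("trial_quantum_win_rate", ("paired_quantum_win_rate", 1)),
  ("trial_quantum_win_rate_mean", ("paired_quantum_win_rate", 2)),
  ("paired.quantum_win_rate", ("paired_quantum_win_rate", 3))]

def pvCanon : List String := [
  "run_id",
  "spec_mode",
  "spec_id",
  "bin_id",
  "bin_label",
  "maze_id",
  "maze_seed",
  "maze_dim",
  "latent_dim",
  "latent_gap",
  "side",
  "barriers",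
  "gaps_per_barrier",
  "effective_train_evals",
  "n_runs_eval",
  "shortest_path",
  "detour_ratio",
  "open_fraction",
  "paired_norm_adv_pct_mean",
  "paired_raw_adv_mean",
  "maze_quantum_win",
  "quantum_mean_dist",
  "classical_mean_dist",
  "planner_mean_dist",
  "paired_quantum_win_rate"]

-- loop body of 'for h in headers: …'
def pvBestStep (best : PySem.Dict String (Int × String)) (h : String) :
    PySem.Dict String (Int × String) :=
  match pvIndex.get? h with
  | none => best
  | some hit =>
      match best.get? hit.1 with
      | none => best.insert hit.1 (hit.2, h)
      | some cur => if hit.2 < cur.1 then best.insert hit.1 (hit.2, h) else best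

def resolve_aliases_alt (headers : List String) : List (String × String) :=
  let best := headers.foldl pvBestStep PySem.Dict.empty
  (pvCanon.foldl
    (fun out c =>
      match best.get? c with
      | some q => out.insert c q.2
      | none => out)
    PySem.Dict.empty).items

-- ===== PRECONDITION & SPEC =====
def Spec_resolve_aliases (headers : List String) (out : List (String × String)) : Prop := out = resolve_aliases_alt headers
instance (headers : List String) (out : List (String × String)) : Decidable (Spec_resolve_aliases headers out) := by unfold Spec_resolve_aliases; infer_instance

-- ===== CLAIM (what is proved, stated in full; the proofs are below) =====
def Claim_equal_resolve_aliases : Prop := ∀ (headers : List String), Dom_resolve_aliases headers → Spec_resolve_aliases headers (resolve_aliases headers)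

-- ===== LEMMAS AND PROOFS =====

-- the rank of h as an alias of canonical c, read off the index
def pvRk (c h : String) : Option Int :=
  match pvIndex.get? h with
  | some hit => if hit.1 = c then some hit.2 else none
  | none => none

def pvMerge (acc : Option (Int × String)) (x : Int × String) : Option (Int × String) :=
  match acc with
  | none => some x
  | some cur => if x.1 < cur.1 then some x else acc

def pvStep1 (c : String) (acc : Option (Int × String)) (h : String) : Option (Int × String) :=
  match pvRk c h with
  | some r => pvMerge acc (r, h)
  | none => acc

-- the per-canonical facts about the literal index, decided once for the whole table
abbrev pvHyp (c : String) (ns : List String) : Prop :=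
  (∀ i : Fin ns.length, pvIndex.get? ns[i] = some (c, (i.val : Int))) ∧
  (∀ e ∈ pvIndex.items, e.2.1 = c → ∃ i : Fin ns.length, ns[i] = e.1 ∧ e.2.2 = (i.val : Int))

set_option maxRecDepth 100000 in
theorem pvHypAll : ∀ p ∈ pvAliases, pvHyp p.1 p.2 := by decide

set_option maxRecDepth 100000 in
theorem pvAliases_keys_nodup : (pvAliases.map Prod.fst).Nodup := by decide

set_option maxRecDepth 100000 in
theorem pvCanon_eq : pvCanon = pvAliases.map Prod.fst := by decide

theorem pv_bestStep_get (best : PySem.Dict String (Int × String)) (h c : String) :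
    (pvBestStep best h).get? c = pvStep1 c (best.get? c) h := by
  unfold pvBestStep pvStep1 pvRk
  cases hidx : pvIndex.get? h with
  | none => rfl
  | some hit =>
      dsimp only
      by_cases hc : hit.1 = c
      · rw [if_pos hc]
        cases hcur : best.get? hit.1 with
        | none =>
            rw [hc] at hcur
            unfold pvMerge
            rw [hcur, hc, PySem.Dict.get?_insert_self]
        | some cur =>
            rw [hc] at hcur
            unfold pvMerge
            rw [hcur]
            dsimp only
            by_cases hlt : hit.2 < cur.1
            · rw [if_pos hlt, if_pos hlt, hc, PySem.Dict.get?_insert_self]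
            · rw [if_neg hlt, if_neg hlt, hcur]
      · rw [if_neg hc]
        cases hcur : best.get? hit.1 with
        | none =>
            dsimp only
            rw [PySem.Dict.get?_insert_of_ne]
            exact fun (h' : c = hit.1) => hc h'.symm
        | some cur =>
            dsimp only
            by_cases hlt : hit.2 < cur.1
            · rw [if_pos hlt, PySem.Dict.get?_insert_of_ne]
              exact fun (h' : c = hit.1) => hc h'.symm
            · rw [if_neg hlt]

-- pointwise description of the header fold
theorem pv_get_fold (hs : List String) (best : PySem.Dict String (Int × String)) (c : String) :
    (hs.foldl pvBestStep best).get? c = hs.foldl (pvStep1 c) (best.get? c) := by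
  induction hs generalizing best with
  | nil => rfl
  | cons h t ih =>
      simp only [List.foldl_cons]
      rw [ih, pv_bestStep_get]

-- a conditional-insert fold is a plain insert fold over the filterMapped list
theorem pv_fold_filterMap {α β : Type} (l : List α) (k : α → String) (g : α → Option β)
    (d : PySem.Dict String β) :
    l.foldl (fun m a => (g a).elim m (fun v => m.insert (k a) v)) d
      = (l.filterMap (fun a => (g a).map (fun v => (k a, v)))).foldl
          (fun m q => m.insert q.1 q.2) d := by
  induction l generalizing d with
  | nil => rfl
  | cons p t ih =>
      cases hg : g p with
      | none => simp [hg, ih]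
      | some v => simp [hg, ih]

theorem pv_filterMap_fst_sublist {α β : Type} (l : List α) (k : α → String) (g : α → Option β) :
    ((l.filterMap (fun a => (g a).map (fun v => (k a, v)))).map Prod.fst).Sublist
      (l.map k) := by
  induction l with
  | nil => simp
  | cons p t ih =>
      cases hg : g p with
      | none => simp only [List.filterMap_cons, hg, Option.map_none, List.map_cons]
                exact ih.cons _
      | some v => simp only [List.filterMap_cons, hg, Option.map_some, List.map_cons]
                  exact ih.cons₂ _

-- items of a conditional-insert fold from the empty dict, when the source keys are distinct
theorem pv_items_fold {α β : Type} (l : List α) (k : α → String) (g : α → Option β)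
    (hnd : (l.map k).Nodup) :
    (l.foldl (fun m a => (g a).elim m (fun v => m.insert (k a) v))
        PySem.Dict.empty).items
      = l.filterMap (fun a => (g a).map (fun v => (k a, v))) := by
  rw [pv_fold_filterMap]
  have hfresh : ∀ a ∈ l.filterMap (fun a => (g a).map (fun v => (k a, v))),
      (PySem.Dict.empty : PySem.Dict String β).contains a.1 = false := by
    intro a _; simp [PySem.Dict.contains_empty]
  have hnd' : ((l.filterMap (fun a => (g a).map (fun v => (k a, v)))).map (fun a => a.1)).Nodup :=
    ((pv_filterMap_fst_sublist l k g).nodup hnd)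
  have := PySem.Dict.items_foldl_insert_fresh
    (l := l.filterMap (fun a => (g a).map (fun v => (k a, v))))
    (k := fun a => a.1) (v := fun a => a.2) (d := PySem.Dict.empty) hfresh hnd'
  simpa using this

-- A's inner loop is a find?
theorem pv_inner_find (hsS : PySem.Set String) (c : String) (m : PySem.Dict String String)
    (ns : List String) :
    pvInner hsS c m ns
      = (ns.find? (fun n => PySem.Set.contains hsS n)).elim m (fun n => m.insert c n) := by
  induction ns with
  | nil => rfl
  | cons n rest ih =>
      cases hc : PySem.Set.contains hsS n with
      | true => simp only [PySem.Set.contains_iff] at hc; simp [pvInner, hc]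
      | false =>
          have hc' : ¬ (n ∈ hsS) := by
            intro hmem
            rw [(PySem.Set.contains_iff _ _).mpr hmem] at hc
            cases hc
          simp [pvInner, hc', ih]

-- fold of pvStep1 = merge-fold over the candidate list
theorem pv_fold_step1 (c : String) (hs : List String) (acc : Option (Int × String)) :
    hs.foldl (pvStep1 c) acc
      = (hs.filterMap (fun h => (pvRk c h).map (fun r => (r, h)))).foldl pvMerge acc := by
  induction hs generalizing acc with
  | nil => rfl
  | cons h t ih =>
      cases hr : pvRk c h with
      | none =>
          have h1 : pvStep1 c acc h = acc := by unfold pvStep1; rw [hr]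
          simp only [List.foldl_cons, List.filterMap_cons, hr, Option.map_none, h1, ih]
      | some r =>
          have h1 : pvStep1 c acc h = pvMerge acc (r, h) := by unfold pvStep1; rw [hr]
          simp only [List.foldl_cons, List.filterMap_cons, hr, Option.map_some, h1, ih]

theorem pv_merge_none {L : List (Int × String)} {acc : Option (Int × String)}
    (h : L.foldl pvMerge acc = none) : acc = none ∧ L = [] := by
  induction L generalizing acc with
  | nil => exact ⟨h, rfl⟩
  | cons x t ih =>
      exfalso
      have h1 := (ih (acc := pvMerge acc x) h).1
      unfold pvMerge at h1
      cases acc with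
      | none => dsimp only at h1; cases h1
      | some cur =>
          dsimp only at h1
          by_cases hlt : x.1 < cur.1
          · rw [if_pos hlt] at h1; cases h1
          · rw [if_neg hlt] at h1; cases h1

theorem pv_merge_mem {L : List (Int × String)} {acc : Option (Int × String)} {m : Int × String}
    (h : L.foldl pvMerge acc = some m) : acc = some m ∨ m ∈ L := by
  induction L generalizing acc with
  | nil => exact Or.inl h
  | cons x t ih =>
      rcases ih (acc := pvMerge acc x) h with h' | h'
      · unfold pvMerge at h'
        cases acc with
        | none =>
            dsimp only at h'
            have hx := Option.some.inj h'
            subst hx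
            exact Or.inr (List.mem_cons_self)
        | some cur =>
            dsimp only at h'
            by_cases hlt : x.1 < cur.1
            · rw [if_pos hlt] at h'
              have hx := Option.some.inj h'
              subst hx
              exact Or.inr (List.mem_cons_self)
            · rw [if_neg hlt] at h'
              exact Or.inl h'
      · right; exact List.mem_cons_of_mem _ h'

theorem pv_merge_min {L : List (Int × String)} {acc : Option (Int × String)} {m : Int × String}
    (h : L.foldl pvMerge acc = some m) :
    (∀ x ∈ L, m.1 ≤ x.1) ∧ (∀ a, acc = some a → m.1 ≤ a.1) := by
  induction L generalizing acc with
  | nil =>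
      refine ⟨by simp, ?_⟩
      intro a ha
      have hm : a = m := Option.some.inj (show some a = some m from ha ▸ h)
      simp [hm]
  | cons x t ih =>
      obtain ⟨h1, h2⟩ := ih (acc := pvMerge acc x) h
      have hx : m.1 ≤ x.1 ∧ (∀ a, acc = some a → m.1 ≤ a.1) := by
        unfold pvMerge at h2
        cases acc with
        | none => exact ⟨h2 x rfl, by simp⟩
        | some cur =>
            dsimp only at h2
            by_cases hlt : x.1 < cur.1
            · have := h2 x (by simp [hlt])
              exact ⟨this, fun a ha => by
                cases Option.some.inj ha; exact le_trans this (le_of_lt hlt)⟩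
            · have := h2 cur (by simp [hlt])
              exact ⟨le_trans this (le_of_not_gt hlt), fun a ha => by
                cases Option.some.inj ha; exact this⟩
      exact ⟨fun y hy => by
        rcases List.mem_cons.mp hy with rfl | hy
        · exact hx.1
        · exact h1 y hy, hx.2⟩

-- candidate membership
theorem pv_cand_mem {headers : List String} {r : Int} {h c : String} :
    (r, h) ∈ headers.filterMap (fun h => (pvRk c h).map (fun r => (r, h)))
      ↔ h ∈ headers ∧ pvRk c h = some r := by
  simp only [List.mem_filterMap, Option.map_eq_some_iff]
  constructor
  · rintro ⟨a, ha, r', hr', heq⟩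
    obtain ⟨h1, h2⟩ := Prod.mk.injEq .. ▸ heq
    exact ⟨h2 ▸ ha, h2 ▸ h1 ▸ hr'⟩
  · rintro ⟨ha, hr⟩
    exact ⟨h, ha, r, hr, rfl⟩

-- soundness of pvRk against one canonical's alias list
theorem pv_rk_sound {c ns} (hyp : pvHyp c ns) {h : String} {r : Int}
    (hr : pvRk c h = some r) : ∃ i : Fin ns.length, ns[i] = h ∧ r = (i.val : Int) := by
  unfold pvRk at hr
  cases hidx : pvIndex.get? h with
  | none => rw [hidx] at hr; dsimp only at hr; cases hr
  | some hit =>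
      rw [hidx] at hr
      dsimp only at hr
      by_cases hc : hit.1 = c
      · rw [if_pos hc] at hr
        have hmem := PySem.Dict.mem_items_of_get?_eq_some _ hidx
        obtain ⟨i, hi1, hi2⟩ := hyp.2 (h, hit) hmem hc
        exact ⟨i, hi1, (Option.some.inj hr) ▸ hi2⟩
      · rw [if_neg hc] at hr; cases hr

theorem pv_rk_complete {c ns} (hyp : pvHyp c ns) (i : Fin ns.length) :
    pvRk c ns[i] = some (i.val : Int) := by
  unfold pvRk
  rw [hyp.1 i]
  simp

-- the core per-canonical lemma
theorem pvG {c : String} {ns : List String} (hyp : pvHyp c ns) (headers : List String) :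
    ns.find? (fun n => headers.contains n)
      = (headers.foldl (pvStep1 c) none).map (fun q => q.2) := by
  rw [pv_fold_step1]
  set L := headers.filterMap (fun h => (pvRk c h).map (fun r => (r, h))) with hL
  cases hfind : ns.find? (fun n => headers.contains n) with
  | none =>
      have hnone := List.find?_eq_none.mp hfind
      have hLnil : L = [] := by
        rw [hL]
        rw [List.filterMap_eq_nil_iff]
        intro h hh
        cases hr : pvRk c h with
        | none => simp
        | some r =>
            exfalso
            obtain ⟨i, hi1, _⟩ := pv_rk_sound hyp hr
            have : h ∈ ns := hi1 ▸ List.getElem_mem _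
            exact (hnone h this) (by simpa using hh)
      rw [hLnil]; rfl
  | some n =>
      obtain ⟨hp, as, bs, hsplit, hbefore⟩ := List.find?_eq_some_iff_append.mp hfind
      have hn_mem : n ∈ headers := by simpa using hp
      have hi0 : as.length < ns.length := by
        rw [hsplit]; simp
      have hns_i0 : ns[as.length]'hi0 = n := by
        subst hsplit
        simp
      -- the candidate at the first matching rank
      have hx0 : ((as.length : Int), n) ∈ L := by
        rw [hL, pv_cand_mem]
        refine ⟨hn_mem, ?_⟩
        have := pv_rk_complete hyp ⟨as.length, hi0⟩
        simpa [hns_i0] using this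
      cases hres : L.foldl pvMerge none with
      | none =>
          exfalso
          have := (pv_merge_none hres).2
          rw [this] at hx0; cases hx0
      | some m =>
          rcases pv_merge_mem hres with h' | hm
          · cases h'
          · have hmins := (pv_merge_min hres).1
            have hm' : (m.1, m.2) ∈ headers.filterMap (fun h => (pvRk c h).map (fun r => (r, h))) := by
              rw [← hL]; simpa using hm
            obtain ⟨hmh, hrk⟩ := pv_cand_mem.mp hm'
            obtain ⟨i, hi1, hi2⟩ := pv_rk_sound hyp hrk
            have hi1' : ns[i.val]'i.isLt = m.2 := hi1
            have hle : m.1 ≤ (as.length : Int) := hmins _ hx0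
            have hge : as.length ≤ i.val := by
              by_contra hltc0
              have hltc : i.val < as.length := by omega
              have hmem_as : m.2 ∈ as := by
                rw [← hi1']
                subst hsplit
                rw [List.getElem_append_left hltc]
                exact List.getElem_mem _
              have hcontra := hbefore _ hmem_as
              simp [hmh] at hcontra
            have hie : i.val = as.length := by omega
            have h1 : ns[i.val]? = some m.2 := by
              rw [List.getElem?_eq_getElem i.isLt]; exact congrArg some hi1'
            have h2 : ns[as.length]? = some n := by
              rw [List.getElem?_eq_getElem hi0]; exact congrArg some hns_i0
            rw [hie] at h1
            rw [h1] at h2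
            have hmn : m.2 = n := Option.some.inj h2
            simp [hmn]

-- replace the Set-membership predicate by plain list membership
theorem pv_pred_eq (headers : List String) (n : String) :
    PySem.Set.contains (PySem.Set.ofList headers) n = headers.contains n := by
  by_cases hmem : n ∈ headers
  · have h1 : PySem.Set.contains (PySem.Set.ofList headers) n = true :=
      (PySem.Set.contains_iff _ _).mpr (by simp [PySem.Set.mem_ofList, hmem])
    rw [h1]
    symm
    simpa using hmem
  · have h1 : PySem.Set.contains (PySem.Set.ofList headers) n = false := by
      rcases hb : PySem.Set.contains (PySem.Set.ofList headers) n with _ | _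
      · rfl
      · exfalso
        have h2 := (PySem.Set.contains_iff _ _).mp hb
        rw [PySem.Set.mem_ofList] at h2
        exact hmem h2
    rw [h1]
    symm
    simpa using hmem

-- A reduced to a filterMap over the table
theorem pvA_eq (headers : List String) :
    resolve_aliases headers
      = pvAliases.filterMap (fun p =>
          (p.2.find? (fun n => headers.contains n)).map (fun n => (p.1, n))) := by
  unfold resolve_aliases
  have hstep : (fun (mapping : PySem.Dict String String) (p : String × List String) =>
        pvInner (PySem.Set.ofList headers) p.1 mapping p.2)
      = (fun m p => (p.2.find? (fun n => headers.contains n)).elim m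
          (fun v => m.insert p.1 v)) := by
    funext m p
    rw [pv_inner_find]
    have : (fun n => PySem.Set.contains (PySem.Set.ofList headers) n)
        = (fun n => headers.contains n) := funext (pv_pred_eq headers)
    rw [this]
  simp only [hstep]
  exact pv_items_fold pvAliases Prod.fst (fun p => p.2.find? (fun n => headers.contains n))
    pvAliases_keys_nodup

-- B reduced to a filterMap over the canonical-key list
theorem pvB_eq (headers : List String) :
    resolve_aliases_alt headers
      = pvCanon.filterMap (fun c =>
          (((headers.foldl pvBestStep PySem.Dict.empty).get? c).map (fun q => q.2)).map
            (fun v => (c, v))) := by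
  unfold resolve_aliases_alt
  have hstep : (fun (out : PySem.Dict String String) (c : String) =>
        match (headers.foldl pvBestStep PySem.Dict.empty).get? c with
        | some q => out.insert c q.2
        | none => out)
      = (fun m c =>
          (((headers.foldl pvBestStep PySem.Dict.empty).get? c).map (fun q => q.2)).elim m
            (fun v => m.insert c v)) := by
    funext m c
    cases (headers.foldl pvBestStep PySem.Dict.empty).get? c <;> rfl
  simp only [hstep]
  have hnd : (pvCanon.map (fun c => c)).Nodup := by
    rw [pvCanon_eq]; simpa using pvAliases_keys_nodup
  exact pv_items_fold pvCanon (fun c => c)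
    (fun c => ((headers.foldl pvBestStep PySem.Dict.empty).get? c).map (fun q => q.2)) hnd

-- ===== VERDICT (by name: the statement is the Claim_ definition above) =====
theorem resolve_aliases_spec : Claim_equal_resolve_aliases := by
  intro headers _
  unfold Spec_resolve_aliases
  rw [pvA_eq, pvB_eq, pvCanon_eq, List.filterMap_map]
  apply List.filterMap_congr
  intro p hp
  simp only [Function.comp]
  rw [pv_get_fold, PySem.Dict.get?_empty]
  rw [pvG (pvHypAll p hp) headers]
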